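-- pv_equiv track=rewrite | github.com/AlveeM/coding-problems-js | dynamic-programming/0018_coin_change_no_more_than_t_coins.py | coin_change_no_more_t_coins
-- ===== SOURCE A (Python) =====
-- def coin_change_no_more_t_coins(n, t, coins):
--     dp = [[0] * (t+1) for _ in range(n+1)]
--     dp[0][0] = 1
--
--     for i in range(n+1):
--         for j in range(t+1):
--             if i > 0 and j == 0:
--                 dp[i][j] = 0
--                 continue
--
--             if i == 0 and j > 0:
--                 dp[i][j] = 1
--                 continue
--
--             for coin in coins:
--                 if i-coin >= 0:
--                     dp[i][j] += dp[i-coin][j-1]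
--
--     return dp[n][t]
-- ===== SOURCE B (Python) =====
-- def coin_change_no_more_t_coins(n, t, coins):
--     # Sum, over k = 0..t, the number of coin sequences of exact length k summing to n,
--     # keeping only a 1-D layer "exact[i] = #sequences of the current length with sum i".
--     exact = [0] * (n + 1)
--     exact[0] = 1
--     total = exact[n]
--     for _ in range(t):
--         exact = [sum(exact[i - c] for c in coins if i - c >= 0) for i in range(n + 1)]
--         total += exact[n]
--     return total
-- ===== Notes on version B (the rewrite author's own statement) =====
-- stated objective: alternative
-- what changed: B replaces A's branch-heavy bottom-up (n+1)x(t+1) table with a 1-D exact-length layer that is rebuilt t times, summing the layer's n-th entry, so no 2-D table and no per-cell branch cases exist.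
-- outside the precondition, e.g. on coin_change_no_more_t_coins(0, 0, [0]): A returns 2, B returns 1; on coin_change_no_more_t_coins(2, 0, [-1]): A returns 0, B returns 0
import Mathlib
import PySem

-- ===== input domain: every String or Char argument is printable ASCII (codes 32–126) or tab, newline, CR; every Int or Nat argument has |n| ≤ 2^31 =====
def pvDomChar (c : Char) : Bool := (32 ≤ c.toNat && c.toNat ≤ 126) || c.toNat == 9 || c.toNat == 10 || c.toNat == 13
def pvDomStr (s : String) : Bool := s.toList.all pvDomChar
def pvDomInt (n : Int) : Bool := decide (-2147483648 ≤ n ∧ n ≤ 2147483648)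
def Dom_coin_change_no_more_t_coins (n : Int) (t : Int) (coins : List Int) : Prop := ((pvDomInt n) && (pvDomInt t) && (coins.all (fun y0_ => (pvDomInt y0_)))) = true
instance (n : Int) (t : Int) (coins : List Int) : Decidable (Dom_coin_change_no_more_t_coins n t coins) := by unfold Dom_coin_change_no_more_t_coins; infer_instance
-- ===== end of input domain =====

-- B replaces A's branch-heavy (n+1)×(t+1) table with a 1-D "exact-length" layer that is
-- rebuilt t times and whose n-th entry is summed; same values, different decomposition.

-- ===== PORT A =====
-- A's dp is a Python list of lists mutated cell by cell; it is ported as a strict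
-- last-write-wins cell store (assoc list keyed by (i, j), unset cells read 0, the
-- initial store holds dp[0][0] = 1) — exact on Pre_, where every read dp[i-coin][j-1]
-- has 0 ≤ i-coin ≤ n and 0 ≤ j-1 ≤ t (no negative-index wraparound, nothing out of range).
def pvLook : List ((Int × Int) × Int) → Int → Int → Int
  | [], _, _ => 0
  | (k, v) :: rest, a, b => if a = k.1 ∧ b = k.2 then v else pvLook rest a b

def pvUpd (d : List ((Int × Int) × Int)) (a b v : Int) : List ((Int × Int) × Int) :=
  ((a, b), v) :: d

-- body of the 'for j in range(t+1)' iteration: the two continue-branches, then the coin loop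
def pvCellA (coins : List Int) (i j : Int) (dp : List ((Int × Int) × Int)) :
    List ((Int × Int) × Int) :=
  if i > 0 ∧ j = 0 then pvUpd dp i j 0
  else if i = 0 ∧ j > 0 then pvUpd dp i j 1
  else coins.foldl (fun d c =>
    if i - c ≥ 0 then pvUpd d i j (pvLook d i j + pvLook d (i - c) (j - 1)) else d) dp

def coin_change_no_more_t_coins (n : Int) (t : Int) (coins : List Int) : Int :=
  let dp := pvUpd [] 0 0 1                          -- all-zero table, then dp[0][0] = 1
  pvLook ((PySem.List.pyRange 0 (n + 1) 1).foldl (fun dp i =>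
      (PySem.List.pyRange 0 (t + 1) 1).foldl (fun dp j => pvCellA coins i j dp) dp) dp) n t

-- ===== PORT B =====
-- one layer rebuild: [sum(exact[i-c] for c in coins if i-c >= 0) for i in range(n+1)]
def pvLayerB (coins : List Int) (n : Int) (ex : List Int) : List Int :=
  (PySem.List.pyRange 0 (n + 1) 1).map (fun i =>
    coins.foldl (fun s c => if i - c ≥ 0 then s + PySem.List.pyGetD ex (i - c) 0 else s) 0)

-- loop body: exact = <new layer>; total += exact[n]
def pvStepB (coins : List Int) (n : Int) (st : List Int × Int) : List Int × Int :=
  let e := pvLayerB coins n st.1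
  (e, st.2 + PySem.List.pyGetD e n 0)

def coin_change_no_more_t_coins_alt (n : Int) (t : Int) (coins : List Int) : Int :=
  let ex := (List.replicate (n + 1).toNat (0 : Int)).set 0 1   -- [0]*(n+1); exact[0] = 1
  ((PySem.List.pyRange 0 t 1).foldl (fun st _ => pvStepB coins n st)
      (ex, PySem.List.pyGetD ex n 0)).2

-- ===== PRECONDITION & SPEC =====
-- Pre_ excludes negative n or t (A raises IndexError building/indexing the table) and
-- non-positive coins, where A's value — when it returns at all — comes from Python's
-- negative-index wraparound dp[i-coin][-1], an accident of the table layout.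
def Pre_coin_change_no_more_t_coins (n : Int) (t : Int) (coins : List Int) : Prop :=
  0 ≤ n ∧ 0 ≤ t ∧ ∀ c ∈ coins, 0 < c
instance (n : Int) (t : Int) (coins : List Int) : Decidable (Pre_coin_change_no_more_t_coins n t coins) := by unfold Pre_coin_change_no_more_t_coins; infer_instance
def pvWitness_coin_change_no_more_t_coins : Int × Int × List Int := (4, 3, [1, 2])

def Spec_coin_change_no_more_t_coins (n : Int) (t : Int) (coins : List Int) (out : Int) : Prop := out = coin_change_no_more_t_coins_alt n t coins
instance (n : Int) (t : Int) (coins : List Int) (out : Int) : Decidable (Spec_coin_change_no_more_t_coins n t coins out) := by unfold Spec_coin_change_no_more_t_coins; infer_instance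

-- ===== CLAIM (what is proved, stated in full; the proofs are below) =====
def Claim_equal_coin_change_no_more_t_coins : Prop := ∀ (n : Int) (t : Int) (coins : List Int), Dom_coin_change_no_more_t_coins n t coins → Pre_coin_change_no_more_t_coins n t coins → Spec_coin_change_no_more_t_coins n t coins (coin_change_no_more_t_coins n t coins)

-- ===== LEMMAS AND PROOFS =====

-- the common inner sum: Σ_{c ∈ coins, i-c ≥ 0} f (i-c), as both programs' coin loop computes it
def pvS (coins : List Int) (f : Int → Int) (i : Int) : Int :=
  coins.foldl (fun s c => if i - c ≥ 0 then s + f (i - c) else s) 0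

-- W j i = A's dp[i][j] (number of coin sequences of length ≤ j summing to i)
def pvW (coins : List Int) : Nat → Int → Int
  | 0, i => if i = 0 then 1 else 0
  | j + 1, i => if i = 0 then 1 else pvS coins (pvW coins j) i

-- E k i = B's exact layer (sequences of length exactly k summing to i)
def pvE (coins : List Int) : Nat → Int → Int
  | 0, i => if i = 0 then 1 else 0
  | k + 1, i => pvS coins (pvE coins k) i

theorem pvS_eq_sum (coins : List Int) (f : Int → Int) (i : Int) :
    pvS coins f i = ((coins.filter (fun c => decide (i - c ≥ 0))).map (fun c => f (i - c))).sum := by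
  unfold pvS
  rw [PySem.List.foldl_ite_eq_foldl_filter]
  rw [show (fun (s : Int) (c : Int) => s + f (i - c)) = fun s c => s + (fun c => f (i - c)) c from rfl]
  rw [PySem.List.foldl_add]
  simp

theorem pvS_congr (coins : List Int) (f g : Int → Int) (i : Int)
    (h : ∀ c ∈ coins, i - c ≥ 0 → f (i - c) = g (i - c)) : pvS coins f i = pvS coins g i := by
  rw [pvS_eq_sum, pvS_eq_sum]
  congr 1
  apply List.map_congr_left
  intro c hc
  exact h c (List.mem_of_mem_filter hc) (by simpa using List.of_mem_filter hc)

theorem pvS_nil_filter (coins : List Int) (f : Int → Int) (i : Int)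
    (h : ∀ c ∈ coins, ¬ (i - c ≥ 0)) : pvS coins f i = 0 := by
  rw [pvS_eq_sum]
  rw [List.filter_eq_nil_iff.mpr (by intro c hc; simpa using h c hc)]
  simp

theorem pvS_add (coins : List Int) (f g : Int → Int) (i : Int) :
    pvS coins (fun x => f x + g x) i = pvS coins f i + pvS coins g i := by
  rw [pvS_eq_sum, pvS_eq_sum, pvS_eq_sum]
  induction (coins.filter (fun c => decide (i - c ≥ 0))) with
  | nil => simp
  | cons c cs ih => simp [ih]; ring

theorem pvS_cons (c : Int) (cs : List Int) (f : Int → Int) (i : Int) :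
    pvS (c :: cs) f i = (if i - c ≥ 0 then f (i - c) else 0) + pvS cs f i := by
  rw [pvS_eq_sum, pvS_eq_sum]
  by_cases h : c ≤ i <;> simp [h]

theorem pvW_zero_left (coins : List Int) (j : Nat) : pvW coins j 0 = 1 := by
  cases j <;> simp [pvW]

-- bridge: ways with ≤ j coins = sum of exact-length layers 0..j  (positive coins)
theorem pvW_eq_sumE (coins : List Int) (hc : ∀ c ∈ coins, 0 < c) :
    ∀ (j : Nat) (i : Int), pvW coins j i = ((List.range (j + 1)).map (fun k => pvE coins k i)).sum := by
  intro j
  induction j with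
  | zero => intro i; simp [pvW, pvE]
  | succ j ih =>
    intro i
    have hsum : ∀ x : Int, ((List.range (j + 1)).map (fun k => pvE coins (k + 1) x)).sum
        = pvS coins (fun y => ((List.range (j + 1)).map (fun k => pvE coins k y)).sum) x := by
      intro x
      induction (List.range (j + 1)) with
      | nil => simp [pvS_eq_sum]
      | cons k ks ihk =>
        simp only [List.map_cons, List.sum_cons, ihk]
        rw [show pvE coins (k + 1) x = pvS coins (pvE coins k) x from rfl, ← pvS_add]
    have hrange : List.range (j + 2) = 0 :: (List.range (j + 1)).map Nat.succ :=
      List.range_succ_eq_map (n := j + 1)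
    rw [hrange]
    by_cases hi : i = 0
    · subst hi
      have : pvS coins (fun y => ((List.range (j + 1)).map (fun k => pvE coins k y)).sum) 0 = 0 := by
        apply pvS_nil_filter
        intro c hcc
        have := hc c hcc
        omega
      simp only [List.map_cons, List.sum_cons, List.map_map]
      rw [show ((List.range (j + 1)).map ((fun k => pvE coins k 0) ∘ Nat.succ)).sum
            = ((List.range (j + 1)).map (fun k => pvE coins (k + 1) 0)).sum from rfl]
      rw [hsum 0, this]
      simp [pvW, pvE]
    · simp only [List.map_cons, List.sum_cons, List.map_map]
      rw [show ((List.range (j + 1)).map ((fun k => pvE coins k i) ∘ Nat.succ)).sum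
            = ((List.range (j + 1)).map (fun k => pvE coins (k + 1) i)).sum from rfl]
      rw [hsum i]
      have : pvS coins (fun y => ((List.range (j + 1)).map (fun k => pvE coins k y)).sum) i
          = pvS coins (pvW coins j) i := by
        apply pvS_congr
        intro c hcc _
        exact (ih (i - c)).symm
      rw [this]
      simp [pvW, pvE, hi]

-- ---------- A-side: the table fill computes pvW ----------

-- the value of an untouched cell (zeros, except the seeded dp[0][0] = 1)
def pvInitF : Int → Int → Int := fun i j => if i = 0 ∧ j = 0 then 1 else 0

-- intended table contents after the outer loop has processed rows 0..m-1
def pvPartial (coins : List Int) (t m : Int) : Int → Int → Int :=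
  fun i j => if 0 ≤ i ∧ i < m ∧ 0 ≤ j ∧ j ≤ t then pvW coins j.toNat i else pvInitF i j

-- intended contents while row m is being filled, columns 0..p-1 done
def pvPartialRow (coins : List Int) (t m p : Int) : Int → Int → Int :=
  fun i j => if (0 ≤ i ∧ i < m ∧ 0 ≤ j ∧ j ≤ t) ∨ (i = m ∧ 0 ≤ j ∧ j < p) then pvW coins j.toNat i
             else pvInitF i j

theorem coinFold (coins : List Int) (i j : Int) (dp : List ((Int × Int) × Int)) (a b : Int) :
    pvLook (coins.foldl (fun d c =>
        if i - c ≥ 0 then pvUpd d i j (pvLook d i j + pvLook d (i - c) (j - 1)) else d) dp) a b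
      = if a = i ∧ b = j then pvLook dp i j + pvS coins (fun x => pvLook dp x (j - 1)) i
        else pvLook dp a b := by
  induction coins generalizing dp with
  | nil =>
    simp only [List.foldl_nil, pvS, add_zero]
    split_ifs with h
    · obtain ⟨h1, h2⟩ := h; rw [h1, h2]
    · rfl
  | cons c cs ih =>
    simp only [List.foldl_cons]
    set d1 := if i - c ≥ 0 then pvUpd dp i j (pvLook dp i j + pvLook dp (i - c) (j - 1)) else dp
      with hd1
    have hA : ∀ x, pvLook d1 x (j - 1) = pvLook dp x (j - 1) := by
      intro x
      rw [hd1]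
      split_ifs with h
      · simp only [pvUpd, pvLook]
        rw [if_neg (by rintro ⟨_, hh⟩; omega)]
      · rfl
    have hB : pvLook d1 i j = pvLook dp i j + (if i - c ≥ 0 then pvLook dp (i - c) (j - 1) else 0) := by
      rw [hd1]
      split_ifs with h
      · simp [pvUpd, pvLook]
      · simp
    have hC : ∀ a' b', ¬ (a' = i ∧ b' = j) → pvLook d1 a' b' = pvLook dp a' b' := by
      intro a' b' hab
      rw [hd1]
      split_ifs with h
      · simp only [pvUpd, pvLook]
        rw [if_neg hab]
      · rfl
    rw [ih d1]
    have hS : pvS cs (fun x => pvLook d1 x (j - 1)) i = pvS cs (fun x => pvLook dp x (j - 1)) i :=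
      pvS_congr _ _ _ _ (fun c' _ _ => hA (i - c'))
    rw [hS, hB, pvS_cons]
    by_cases hab : a = i ∧ b = j
    · rw [if_pos hab, if_pos hab]
      ring
    · rw [if_neg hab, if_neg hab]
      exact hC a b hab

theorem pvPartialRow_succ (coins : List Int) (t m j : Int) (hj : 0 ≤ j) (hjt : j ≤ t)
    (a b : Int) :
    pvPartialRow coins t m (j + 1) a b
      = if a = m ∧ b = j then pvW coins j.toNat m else pvPartialRow coins t m j a b := by
  simp only [pvPartialRow]
  by_cases hab : a = m ∧ b = j
  · obtain ⟨h1, h2⟩ := hab; subst h1; subst h2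
    rw [if_pos (Or.inr ⟨by trivial, hj, by omega⟩), if_pos ⟨by trivial, by trivial⟩]
  · rw [if_neg hab]
    by_cases hcond : (0 ≤ a ∧ a < m ∧ 0 ≤ b ∧ b ≤ t) ∨ (a = m ∧ 0 ≤ b ∧ b < j)
    · rw [if_pos (by rcases hcond with h | h
                     · exact Or.inl h
                     · exact Or.inr ⟨h.1, h.2.1, by omega⟩), if_pos hcond]
    · rw [if_neg (by rintro (h | ⟨h1, h2, h3⟩)
                     · exact hcond (Or.inl h)
                     · by_cases hbj : b = j
                       · exact hab ⟨h1, hbj⟩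
                       · exact hcond (Or.inr ⟨h1, h2, by omega⟩)), if_neg hcond]

theorem cellStep (coins : List Int) (t m j : Int) (hc : ∀ c ∈ coins, 0 < c)
    (hm : 0 ≤ m) (hj : 0 ≤ j) (hjt : j ≤ t) (dp : List ((Int × Int) × Int))
    (hdp : ∀ a b, pvLook dp a b = pvPartialRow coins t m j a b) :
    ∀ a b, pvLook (pvCellA coins m j dp) a b = pvPartialRow coins t m (j + 1) a b := by
  intro a b
  rw [pvPartialRow_succ coins t m j hj hjt]
  unfold pvCellA
  by_cases hb1 : m > 0 ∧ j = 0
  · rw [if_pos hb1]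
    obtain ⟨hm0, hj0⟩ := hb1; subst hj0
    simp only [pvUpd, pvLook]
    split_ifs with h
    · symm
      simp only [Int.toNat_zero, pvW]
      exact if_neg (by omega)
    · exact hdp a b
  · by_cases hb2 : m = 0 ∧ j > 0
    · rw [if_neg hb1, if_pos hb2]
      obtain ⟨hm0, hj0⟩ := hb2; subst hm0
      simp only [pvUpd, pvLook]
      split_ifs with h
      · exact (pvW_zero_left coins j.toNat).symm
      · exact hdp a b
    · rw [if_neg hb1, if_neg hb2, coinFold]
      split_ifs with h
      · have hmj : (m = 0 ∧ j = 0) ∨ (0 < m ∧ 0 < j) := by omega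
        rcases hmj with ⟨hm0, hj0⟩ | ⟨hm0, hj0⟩
        · subst hm0; subst hj0
          have h1 : pvLook dp 0 0 = 1 := by
            rw [hdp]
            simp only [pvPartialRow, pvInitF]
            rw [if_neg (by rintro (⟨_, hh, _⟩ | ⟨_, _, hh⟩) <;> omega),
              if_pos ⟨by trivial, by trivial⟩]
          have h2 : pvS coins (fun x => pvLook dp x (0 - 1)) 0 = 0 :=
            pvS_nil_filter _ _ _ (fun c hcc => by have := hc c hcc; omega)
          rw [h1, h2]
          simp [pvW]
        · have h1 : pvLook dp m j = 0 := by
            rw [hdp]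
            simp only [pvPartialRow, pvInitF]
            rw [if_neg (by rintro (⟨_, hh, _⟩ | ⟨_, _, hh⟩) <;> omega), if_neg (by omega)]
          have h2 : pvS coins (fun x => pvLook dp x (j - 1)) m
              = pvS coins (fun x => pvW coins (j - 1).toNat x) m := by
            apply pvS_congr
            intro c hcc hge
            have hcpos := hc c hcc
            rw [hdp]
            simp only [pvPartialRow]
            rw [if_pos (Or.inl ⟨by omega, by omega, by omega, by omega⟩)]
          rw [h1, h2, zero_add]
          have hjn : j.toNat = (j - 1).toNat + 1 := by omega
          rw [hjn]
          simp only [pvW]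
          rw [if_neg (by omega)]
      · exact hdp a b

theorem rowFold (coins : List Int) (t m : Int) (hc : ∀ c ∈ coins, 0 < c)
    (hm : 0 ≤ m) (ht : 0 ≤ t) (dp : List ((Int × Int) × Int))
    (hdp : ∀ a b, pvLook dp a b = pvPartial coins t m a b) :
    ∀ a b, pvLook ((PySem.List.pyRange 0 (t + 1) 1).foldl
        (fun dp j => pvCellA coins m j dp) dp) a b = pvPartial coins t (m + 1) a b := by
  have base : ∀ a b, pvPartialRow coins t m 0 a b = pvPartial coins t m a b := by
    intro a b
    simp only [pvPartialRow, pvPartial]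
    by_cases h : 0 ≤ a ∧ a < m ∧ 0 ≤ b ∧ b ≤ t
    · rw [if_pos (Or.inl h), if_pos h]
    · rw [if_neg (by rintro (hh | ⟨_, _, hh⟩)
                     · exact h hh
                     · omega), if_neg h]
  have key : ∀ k : Nat, (k : Int) ≤ t + 1 →
      ∀ a b, pvLook ((PySem.List.pyRange 0 (k : Int) 1).foldl
          (fun dp j => pvCellA coins m j dp) dp) a b = pvPartialRow coins t m (k : Int) a b := by
    intro k
    induction k with
    | zero =>
      intro _ a b
      simp only [Nat.cast_zero, PySem.List.pyRange_one_eq_nil le_rfl, List.foldl_nil]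
      rw [hdp, base]
    | succ k ih =>
      intro hk a b
      rw [show ((k + 1 : Nat) : Int) = (k : Int) + 1 by push_cast; ring] at hk ⊢
      rw [PySem.List.pyRange_one_succ_right (a := 0) (b := (k : Int)) (by positivity),
        List.foldl_append]
      simp only [List.foldl_cons, List.foldl_nil]
      exact cellStep coins t m (k : Int) hc hm (by positivity) (by omega) _
        (fun a' b' => ih (by omega) a' b') a b
  intro a b
  have hfin := key (t + 1).toNat (by omega) a b
  rw [show (((t + 1).toNat : Int)) = t + 1 by omega] at hfin
  rw [hfin]
  simp only [pvPartialRow, pvPartial]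
  by_cases h : 0 ≤ a ∧ a < m + 1 ∧ 0 ≤ b ∧ b ≤ t
  · rw [if_pos (by by_cases ham : a < m
                   · exact Or.inl ⟨h.1, ham, h.2.2⟩
                   · exact Or.inr ⟨by omega, h.2.2.1, by omega⟩), if_pos h]
  · rw [if_neg (by rintro (⟨h1, h2, h3, h4⟩ | ⟨h1, h2, h3⟩) <;> exact h (by omega)), if_neg h]

theorem outerFold (coins : List Int) (n t : Int) (hc : ∀ c ∈ coins, 0 < c)
    (hn : 0 ≤ n) (ht : 0 ≤ t) :
    ∀ a b, pvLook ((PySem.List.pyRange 0 (n + 1) 1).foldl (fun dp i =>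
        (PySem.List.pyRange 0 (t + 1) 1).foldl (fun dp j => pvCellA coins i j dp) dp)
          (pvUpd [] 0 0 1)) a b
      = pvPartial coins t (n + 1) a b := by
  have key : ∀ k : Nat, (k : Int) ≤ n + 1 →
      ∀ a b, pvLook ((PySem.List.pyRange 0 (k : Int) 1).foldl (fun dp i =>
          (PySem.List.pyRange 0 (t + 1) 1).foldl (fun dp j => pvCellA coins i j dp) dp)
            (pvUpd [] 0 0 1)) a b
        = pvPartial coins t (k : Int) a b := by
    intro k
    induction k with
    | zero =>
      intro _ a b
      simp only [Nat.cast_zero, PySem.List.pyRange_one_eq_nil le_rfl, List.foldl_nil]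
      simp only [pvUpd, pvLook, pvPartial, pvInitF]
      rw [if_neg (show ¬ (0 ≤ a ∧ a < (0 : Int) ∧ 0 ≤ b ∧ b ≤ t) by omega)]
    | succ k ih =>
      intro hk a b
      rw [show ((k + 1 : Nat) : Int) = (k : Int) + 1 by push_cast; ring] at hk ⊢
      rw [PySem.List.pyRange_one_succ_right (a := 0) (b := (k : Int)) (by positivity),
        List.foldl_append]
      simp only [List.foldl_cons, List.foldl_nil]
      exact rowFold coins t (k : Int) hc (by positivity) ht _
        (fun a' b' => ih (by omega) a' b') a b
  intro a b
  have hfin := key (n + 1).toNat (by omega) a b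
  rw [show (((n + 1).toNat : Int)) = n + 1 by omega] at hfin
  exact hfin

theorem portA_eq (n t : Int) (coins : List Int) (hc : ∀ c ∈ coins, 0 < c)
    (hn : 0 ≤ n) (ht : 0 ≤ t) :
    coin_change_no_more_t_coins n t coins = pvW coins t.toNat n := by
  have hrfl : coin_change_no_more_t_coins n t coins
      = pvLook ((PySem.List.pyRange 0 (n + 1) 1).foldl (fun dp i =>
          (PySem.List.pyRange 0 (t + 1) 1).foldl (fun dp j => pvCellA coins i j dp) dp)
            (pvUpd [] 0 0 1)) n t := rfl
  rw [hrfl, outerFold coins n t hc hn ht]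
  simp only [pvPartial]
  rw [if_pos ⟨hn, by omega, ht, le_rfl⟩]

-- ---------- B-side: the layered fold computes Σ pvE ----------

theorem portB_eq (n t : Int) (coins : List Int) (hc : ∀ c ∈ coins, 0 < c)
    (hn : 0 ≤ n) (ht : 0 ≤ t) :
    coin_change_no_more_t_coins_alt n t coins
      = ((List.range (t.toNat + 1)).map (fun k => pvE coins k n)).sum := by
  set ex : List Int := (List.replicate (n + 1).toNat (0 : Int)).set 0 1 with hex0
  have hexlen : ex.length = (n + 1).toNat := by
    rw [hex0, List.length_set, List.length_replicate]
  have hex : ∀ x : Int, 0 ≤ x → x ≤ n → PySem.List.pyGetD ex x 0 = pvE coins 0 x := by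
    intro x hx hxn
    rw [PySem.List.pyGetD_eq_getElem ex 0 hx (by rw [hexlen]; omega)]
    simp only [hex0]
    by_cases h0 : x = 0
    · subst h0
      simp [pvE]
    · have hxt : (0 : Nat) ≠ x.toNat := by omega
      simp [List.getElem_replicate, pvE, hxt, h0]
  have hlayer : ∀ (L : List Int) (k : Nat),
      (∀ x : Int, 0 ≤ x → x ≤ n → PySem.List.pyGetD L x 0 = pvE coins k x) →
      ∀ x : Int, 0 ≤ x → x ≤ n →
        PySem.List.pyGetD (pvLayerB coins n L) x 0 = pvE coins (k + 1) x := by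
    intro L k hL x hx hxn
    unfold pvLayerB
    rw [PySem.List.pyGetD_map_pyRange_of_nonneg _ _ _ _ hx (by omega)]
    have : pvS coins (fun y => PySem.List.pyGetD L y 0) x = pvS coins (pvE coins k) x := by
      apply pvS_congr
      intro c hcc hge
      have := hc c hcc
      exact hL (x - c) (by omega) (by omega)
    exact this
  have key : ∀ k : Nat, (k : Int) ≤ t →
      (∀ x : Int, 0 ≤ x → x ≤ n →
          PySem.List.pyGetD ((PySem.List.pyRange 0 (k : Int) 1).foldl
            (fun st _ => pvStepB coins n st) (ex, PySem.List.pyGetD ex n 0)).1 x 0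
            = pvE coins k x)
      ∧ ((PySem.List.pyRange 0 (k : Int) 1).foldl
            (fun st _ => pvStepB coins n st) (ex, PySem.List.pyGetD ex n 0)).2
          = ((List.range (k + 1)).map (fun m => pvE coins m n)).sum := by
    intro k
    induction k with
    | zero =>
      intro _
      simp only [Nat.cast_zero, PySem.List.pyRange_one_eq_nil le_rfl, List.foldl_nil]
      refine ⟨hex, ?_⟩
      rw [hex n hn le_rfl]
      simp
    | succ k ih =>
      intro hk
      rw [show ((k + 1 : Nat) : Int) = (k : Int) + 1 by push_cast; ring]
      rw [PySem.List.pyRange_one_succ_right (a := 0) (b := (k : Int)) (by positivity),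
        List.foldl_append]
      simp only [List.foldl_cons, List.foldl_nil]
      obtain ⟨ih1, ih2⟩ := ih (by omega)
      constructor
      · intro x hx hxn
        exact hlayer _ k ih1 x hx hxn
      · have hsnd : ∀ st : List Int × Int, (pvStepB coins n st).2
            = st.2 + PySem.List.pyGetD (pvLayerB coins n st.1) n 0 := fun _ => rfl
        rw [hsnd, ih2, hlayer _ k ih1 n hn le_rfl]
        rw [List.range_succ (n := k + 1), List.map_append, List.sum_append]
        simp
  have hfin := key t.toNat (by omega)
  have hrfl : coin_change_no_more_t_coins_alt n t coins
      = ((PySem.List.pyRange 0 t 1).foldl (fun st _ => pvStepB coins n st)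
          (ex, PySem.List.pyGetD ex n 0)).2 := rfl
  rw [hrfl, show t = ((t.toNat : Nat) : Int) by omega]
  exact hfin.2

-- ===== VERDICT (by name: the statement is the Claim_ definition above) =====
theorem coin_change_no_more_t_coins_spec : Claim_equal_coin_change_no_more_t_coins := by
  intro n t coins _ hpre
  obtain ⟨hn, ht, hc⟩ := hpre
  unfold Spec_coin_change_no_more_t_coins
  rw [portA_eq n t coins hc hn ht, portB_eq n t coins hc hn ht, pvW_eq_sumE coins hc]
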